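-- pv_equiv track=rewrite | github.com/maxwell-black/blackslaw-dictionary | scripts/phase2_overlay.py | generate_corrections
-- ===== SOURCE A (Python) =====
-- OCR_PAIRS = [
--     ("C", "O"),
--     ("O", "C"),
--     ("C", "G"),
--     ("G", "C"),
--     ("I", "L"),
--     ("L", "I"),
--     ("U", "V"),
--     ("V", "U"),
--     ("M", "N"),
--     ("N", "M"),
--     ("E", "F"),
--     ("F", "E"),
--     ("T", "I"),
--     ("I", "T"),
--     ("H", "N"),
--     ("N", "H"),
--     ("R", "K"),
--     ("K", "R"),
--     ("Z", "S"),
--     ("S", "Z"),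
--     ("D", "O"),
--     ("O", "D"),
--     ("B", "D"),
--     ("D", "B"),
--     ("P", "R"),
--     ("R", "P"),
-- ]
--
-- OCR_MULTI = [
--     ("OO", "CC"),
--     ("CC", "OO"),
--     ("OC", "CC"),
--     ("AO", "AC"),
--     ("IO", "IC"),
--     ("OI", "CI"),
--     ("EO", "EC"),
--     ("OE", "CE"),
--     ("TZ", "TIO"),
--     ("OT", "CT"),
--     ("LL", "L"),
--     ("OOH", "CCH"),
--     ("OH", "CH"),
-- ]
--
-- def generate_corrections(term: str) -> list[str]:
--     """Generate candidate corrections by applying OCR confusion pairs."""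
--     upper = term.upper()
--     candidates: set[str] = set()
--
--     # Single-char substitutions
--     for i, ch in enumerate(upper):
--         for old, new in OCR_PAIRS:
--             if ch == old:
--                 fixed = upper[:i] + new + upper[i + 1:]
--                 if fixed != upper:
--                     candidates.add(fixed)
--
--     # Multi-char substitutions
--     for old, new in OCR_MULTI:
--         if old in upper:
--             fixed = upper.replace(old, new, 1)
--             if fixed != upper:
--                 candidates.add(fixed)
--
--     # Double substitutions (apply two single-char fixes)
--     for i, ch_i in enumerate(upper):
--         for old_i, new_i in OCR_PAIRS:
--             if ch_i != old_i:
--                 continue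
--             partial = upper[:i] + new_i + upper[i + 1:]
--             for j, ch_j in enumerate(partial):
--                 if j == i:
--                     continue
--                 for old_j, new_j in OCR_PAIRS:
--                     if ch_j != old_j:
--                         continue
--                     fixed = partial[:j] + new_j + partial[j + 1:]
--                     if fixed != upper:
--                         candidates.add(fixed)
--
--     return sorted(candidates)
-- ===== SOURCE B (Python) =====
-- OCR_PAIRS = [
--     ("C", "O"), ("O", "C"), ("C", "G"), ("G", "C"), ("I", "L"), ("L", "I"),
--     ("U", "V"), ("V", "U"), ("M", "N"), ("N", "M"), ("E", "F"), ("F", "E"),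
--     ("T", "I"), ("I", "T"), ("H", "N"), ("N", "H"), ("R", "K"), ("K", "R"),
--     ("Z", "S"), ("S", "Z"), ("D", "O"), ("O", "D"), ("B", "D"), ("D", "B"),
--     ("P", "R"), ("R", "P"),
-- ]
--
-- OCR_MULTI = [
--     ("OO", "CC"), ("CC", "OO"), ("OC", "CC"), ("AO", "AC"), ("IO", "IC"),
--     ("OI", "CI"), ("EO", "EC"), ("OE", "CE"), ("TZ", "TIO"), ("OT", "CT"),
--     ("LL", "L"), ("OOH", "CCH"), ("OH", "CH"),
-- ]
--
-- def generate_corrections(term: str) -> list[str]: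
--     """Generate candidate corrections by applying OCR confusion pairs."""
--     upper = term.upper()
--     # Precomputed edit table: every admissible single-char replacement (position, new char).
--     edits = [(i, new) for i, ch in enumerate(upper) for old, new in OCR_PAIRS if ch == old]
--     candidates: set[str] = set()
--
--     # Single-char substitutions: one edit applied to upper.
--     for i, new in edits:
--         candidates.add(upper[:i] + new + upper[i + 1:])
--
--     # Multi-char substitutions (first occurrence only).
--     for old, new in OCR_MULTI:
--         fixed = upper.replace(old, new, 1)
--         if fixed != upper:
--             candidates.add(fixed)
--
--     # Double substitutions: both edits of an ordered pair of positions applied at once.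
--     for i, ni in edits:
--         for j, nj in edits:
--             if i < j:
--                 candidates.add(upper[:i] + ni + upper[i + 1:j] + nj + upper[j + 1:])
--
--     return sorted(candidates)
-- ===== Notes on version B (the rewrite author's own statement) =====
-- stated objective: alternative
-- what changed: B precomputes the single-edit table (position, replacement) once and produces each double-substitution candidate with one sliced build per ordered pair of edits (i < j) applied directly to upper, instead of A's rebuilding a partial string per edit and re-scanning every position of it against all 26 OCR pairs; singles and the first-occurrence multi-char phase reuse the same table, and the set-then-sort output is unchanged.
import Mathlib
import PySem

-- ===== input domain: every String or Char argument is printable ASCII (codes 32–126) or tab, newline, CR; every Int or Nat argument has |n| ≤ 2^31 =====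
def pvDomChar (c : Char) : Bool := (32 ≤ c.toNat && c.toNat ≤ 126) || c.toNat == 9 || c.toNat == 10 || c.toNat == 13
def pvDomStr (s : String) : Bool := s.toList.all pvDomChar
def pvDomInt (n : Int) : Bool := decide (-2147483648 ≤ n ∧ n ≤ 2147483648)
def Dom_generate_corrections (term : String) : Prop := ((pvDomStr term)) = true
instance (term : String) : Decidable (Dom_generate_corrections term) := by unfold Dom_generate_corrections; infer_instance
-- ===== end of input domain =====

-- B builds the single-edit table once and applies pairs of edits directly to `upper`
-- (one sliced build per ordered pair of positions i < j) instead of re-scanning every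
-- position of each partial string against all OCR pairs; same return value.

-- shared module constants of Source A
def pvOCR_PAIRS : List (Char × Char) :=
  [('C','O'),('O','C'),('C','G'),('G','C'),('I','L'),('L','I'),
   ('U','V'),('V','U'),('M','N'),('N','M'),('E','F'),('F','E'),
   ('T','I'),('I','T'),('H','N'),('N','H'),('R','K'),('K','R'),
   ('Z','S'),('S','Z'),('D','O'),('O','D'),('B','D'),('D','B'),
   ('P','R'),('R','P')]

def pvOCR_MULTI : List (List Char × List Char) :=
  [(['O','O'],['C','C']),(['C','C'],['O','O']),(['O','C'],['C','C']),
   (['A','O'],['A','C']),(['I','O'],['I','C']),(['O','I'],['C','I']),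
   (['E','O'],['E','C']),(['O','E'],['C','E']),(['T','Z'],['T','I','O']),
   (['O','T'],['C','T']),(['L','L'],['L']),(['O','O','H'],['C','C','H']),
   (['O','H'],['C','H'])]

-- hand port of s.replace(old, new, 1): exact for old ≠ "" (splice at the first
-- occurrence found by str.find; all OCR_MULTI olds are non-empty). Used by both ports.
def pvReplace1 (u old new : List Char) : List Char :=
  let k := PySem.Chars.find u old
  if k = -1 then u else u.take k.toNat ++ new ++ u.drop (k.toNat + old.length)

-- ===== PORT A =====
-- upper[:i] + new + upper[i+1:]
def pvFix (u : List Char) (i : Int) (c : Char) : List Char :=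
  PySem.List.slice u none (some i) ++ [c] ++ PySem.List.slice u (some (i+1)) none

def pvA_single (u : List Char) (s0 : PySem.Set String) : PySem.Set String :=
  (PySem.List.enumerate u 0).foldl (fun s p =>
    pvOCR_PAIRS.foldl (fun s q =>
      if p.2 = q.1 then
        if pvFix u p.1 q.2 ≠ u then PySem.Set.add s (String.ofList (pvFix u p.1 q.2)) else s
      else s) s) s0

def pvA_multi (u : List Char) (s0 : PySem.Set String) : PySem.Set String :=
  pvOCR_MULTI.foldl (fun s q =>
    if PySem.Chars.isIn q.1 u then
      if pvReplace1 u q.1 q.2 ≠ u then PySem.Set.add s (String.ofList (pvReplace1 u q.1 q.2)) else s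
    else s) s0

def pvA_double (u : List Char) (s0 : PySem.Set String) : PySem.Set String :=
  (PySem.List.enumerate u 0).foldl (fun s p =>
    pvOCR_PAIRS.foldl (fun s qi =>
      if p.2 = qi.1 then
        (PySem.List.enumerate (pvFix u p.1 qi.2) 0).foldl (fun s pj =>
          if pj.1 = p.1 then s
          else pvOCR_PAIRS.foldl (fun s qj =>
            if pj.2 = qj.1 then
              if pvFix (pvFix u p.1 qi.2) pj.1 qj.2 ≠ u then
                PySem.Set.add s (String.ofList (pvFix (pvFix u p.1 qi.2) pj.1 qj.2))
              else s
            else s) s) s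
      else s) s) s0

def generate_corrections (term : String) : List String :=
  let upper := PySem.Chars.upper term.toList
  PySem.List.sorted (pvA_double upper (pvA_multi upper (pvA_single upper PySem.Set.empty)))
    (fun x => x) false

-- ===== PORT B =====
-- edits = [(i, new) for i, ch in enumerate(upper) for old, new in OCR_PAIRS if ch == old]
def pvEdits (u : List Char) : List (Int × Char) :=
  (PySem.List.enumerate u 0).flatMap (fun p =>
    pvOCR_PAIRS.filterMap (fun q => if p.2 = q.1 then some (p.1, q.2) else none))

-- upper[:i] + ni + upper[i+1:j] + nj + upper[j+1:]
def pvFix2 (u : List Char) (i : Int) (ci : Char) (j : Int) (cj : Char) : List Char :=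
  PySem.List.slice u none (some i) ++ [ci] ++ PySem.List.slice u (some (i+1)) (some j)
    ++ [cj] ++ PySem.List.slice u (some (j+1)) none

def pvB_single (u : List Char) (s0 : PySem.Set String) : PySem.Set String :=
  (pvEdits u).foldl (fun s e => PySem.Set.add s (String.ofList (pvFix u e.1 e.2))) s0

def pvB_multi (u : List Char) (s0 : PySem.Set String) : PySem.Set String :=
  pvOCR_MULTI.foldl (fun s q =>
    if pvReplace1 u q.1 q.2 ≠ u then PySem.Set.add s (String.ofList (pvReplace1 u q.1 q.2)) else s) s0

def pvB_double (u : List Char) (s0 : PySem.Set String) : PySem.Set String :=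
  (pvEdits u).foldl (fun s e =>
    (pvEdits u).foldl (fun s f =>
      if e.1 < f.1 then PySem.Set.add s (String.ofList (pvFix2 u e.1 e.2 f.1 f.2)) else s) s) s0

def generate_corrections_alt (term : String) : List String :=
  let upper := PySem.Chars.upper term.toList
  PySem.List.sorted (pvB_double upper (pvB_multi upper (pvB_single upper PySem.Set.empty)))
    (fun x => x) false

-- ===== PRECONDITION & SPEC =====
def Spec_generate_corrections (term : String) (out : List String) : Prop := out = generate_corrections_alt term
instance (term : String) (out : List String) : Decidable (Spec_generate_corrections term out) := by unfold Spec_generate_corrections; infer_instance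

-- ===== CLAIM (what is proved, stated in full; the proofs are below) =====
def Claim_equal_generate_corrections : Prop := ∀ (term : String), Dom_generate_corrections term → Spec_generate_corrections term (generate_corrections term)

-- ===== LEMMAS AND PROOFS =====

-- generic membership / nodup transport through a conditional-add fold
lemma pv_mem_foldl {α : Type} (g : PySem.Set String → α → PySem.Set String)
    (P : α → String → Prop) (h : ∀ s x y, y ∈ g s x ↔ y ∈ s ∨ P x y) :
    ∀ (l : List α) (s : PySem.Set String) (y : String),
      y ∈ l.foldl g s ↔ y ∈ s ∨ ∃ x ∈ l, P x y := by
  intro l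
  induction l with
  | nil => simp
  | cons a t ih =>
    intro s y
    rw [List.foldl_cons, ih, h]
    simp only [List.mem_cons]
    constructor
    · rintro ((hy | hp) | ⟨x, hx, hp⟩)
      · exact Or.inl hy
      · exact Or.inr ⟨a, Or.inl rfl, hp⟩
      · exact Or.inr ⟨x, Or.inr hx, hp⟩
    · rintro (hy | ⟨x, (rfl | hx), hp⟩)
      · exact Or.inl (Or.inl hy)
      · exact Or.inl (Or.inr hp)
      · exact Or.inr ⟨x, hx, hp⟩

lemma pv_nodup_foldl {α : Type} (g : PySem.Set String → α → PySem.Set String)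
    (h : ∀ (s : PySem.Set String) (x : α), s.Nodup → (g s x).Nodup) :
    ∀ (l : List α) (s : PySem.Set String), s.Nodup → (l.foldl g s).Nodup := by
  intro l
  induction l with
  | nil => intro s hs; simpa using hs
  | cons a t ih => intro s hs; exact ih _ (h s a hs)

-- canonical membership predicates (shared shape of both candidate sets)
def pvPS (u : List Char) (y : String) : Prop :=
  ∃ (k : Nat) (_ : k < u.length), ∃ q ∈ pvOCR_PAIRS, u[k] = q.1 ∧ y = String.ofList (u.set k q.2)

def pvPM (u : List Char) (y : String) : Prop :=
  ∃ q ∈ pvOCR_MULTI, pvReplace1 u q.1 q.2 ≠ u ∧ y = String.ofList (pvReplace1 u q.1 q.2)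

def pvPD (u : List Char) (y : String) : Prop :=
  ∃ (k : Nat) (_ : k < u.length) (m : Nat) (_ : m < u.length), k ≠ m ∧
    ∃ qi ∈ pvOCR_PAIRS, ∃ qj ∈ pvOCR_PAIRS, u[k] = qi.1 ∧ u[m] = qj.1 ∧
      y = String.ofList ((u.set k qi.2).set m qj.2)

-- basic facts
lemma pv_pairs_ne : ∀ q ∈ pvOCR_PAIRS, q.1 ≠ q.2 := by decide

lemma pvFix_eq_set (u : List Char) (k : Nat) (c : Char) (h : k < u.length) :
    pvFix u (k : Int) c = u.set k c := by
  have h1 : ((k : Int) + 1) = ((k + 1 : Nat) : Int) := by push_cast; ring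
  rw [pvFix, h1, PySem.List.slice_to_natCast, PySem.List.slice_from_natCast,
      List.set_eq_take_cons_drop c h]
  simp

lemma pvFix2_eq_set (u : List Char) (k m : Nat) (a b : Char) (hkm : k < m) (hm : m < u.length) :
    pvFix2 u (k : Int) a (m : Int) b = (u.set k a).set m b := by
  have h1 : ((k : Int) + 1) = ((k + 1 : Nat) : Int) := by push_cast; ring
  have h2 : ((m : Int) + 1) = ((m + 1 : Nat) : Int) := by push_cast; ring
  rw [pvFix2, h1, h2, PySem.List.slice_to_natCast, PySem.List.slice_from_natCast,
      PySem.List.slice_natCast]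
  rw [List.set_eq_take_cons_drop b (by simpa using hm), List.take_set, List.drop_set,
      if_pos (by omega), List.set_eq_take_cons_drop a (by simp; omega)]
  rw [List.take_take, List.drop_take]
  simp [Nat.min_eq_left (le_of_lt hkm)]

lemma pv_set_ne (u : List Char) (k : Nat) (c : Char) (h : k < u.length) (hc : c ≠ u[k]) :
    u.set k c ≠ u := by
  intro he
  exact hc (by simpa [List.getElem_set_self, h] using congrArg (fun l => l[k]?) he)

lemma pv_setset_ne (u : List Char) (k m : Nat) (a b : Char) (hm : m < u.length)
    (_hkm : k ≠ m) (hb : b ≠ u[m]) : (u.set k a).set m b ≠ u := by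
  intro he
  apply hb
  have := congrArg (fun l => l[m]?) he
  simpa [List.getElem?_set, _hkm, hm] using this

lemma pv_replace1_self_of_not_in (u : List Char) (o n : List Char)
    (h : PySem.Chars.isIn o u = false) : pvReplace1 u o n = u := by
  have : PySem.Chars.find u o = -1 :=
    (PySem.Chars.find_eq_neg_one_iff u o).2 ((PySem.Chars.isIn_eq_false_iff o u).1 h)
  simp [pvReplace1, this]

-- membership characterisations of the three phases, port A
lemma pv_mem_A_single (u : List Char) (s : PySem.Set String) (y : String) :
    y ∈ pvA_single u s ↔ y ∈ s ∨ pvPS u y := by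
  have hin : ∀ (s : PySem.Set String) (p : Int × Char) (y : String),
      y ∈ pvOCR_PAIRS.foldl (fun s q =>
        if p.2 = q.1 then
          if pvFix u p.1 q.2 ≠ u then PySem.Set.add s (String.ofList (pvFix u p.1 q.2)) else s
        else s) s
      ↔ y ∈ s ∨ ∃ q ∈ pvOCR_PAIRS, p.2 = q.1 ∧ pvFix u p.1 q.2 ≠ u ∧
          y = String.ofList (pvFix u p.1 q.2) := by
    intro s p y
    rw [pv_mem_foldl _ (fun q y => p.2 = q.1 ∧ pvFix u p.1 q.2 ≠ u ∧
          y = String.ofList (pvFix u p.1 q.2))]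
    intro s q y
    split_ifs <;> simp [PySem.Set.mem_add] <;> tauto
  rw [pvA_single, pv_mem_foldl _ _ hin]
  apply or_congr_right
  constructor
  · rintro ⟨p, hp, q, hq, he, hne, rfl⟩
    obtain ⟨k, hk, rfl⟩ := (PySem.List.mem_enumerate_iff u 0 p).1 hp
    simp only [zero_add] at he hne ⊢
    exact ⟨k, hk, q, hq, he, by rw [pvFix_eq_set u k q.2 hk]⟩
  · rintro ⟨k, hk, q, hq, he, rfl⟩
    have hne : pvFix u (k : Int) q.2 ≠ u := by
      rw [pvFix_eq_set u k q.2 hk]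
      exact pv_set_ne u k q.2 hk (by rw [he]; exact (pv_pairs_ne q hq).symm)
    have hval : String.ofList (u.set k q.2) = String.ofList (pvFix u (k : Int) q.2) := by
      rw [pvFix_eq_set u k q.2 hk]
    exact ⟨((k : Int), u[k]), (PySem.List.mem_enumerate_iff u 0 _).2 ⟨k, hk, by simp⟩,
      q, hq, he, hne, hval⟩

lemma pv_mem_A_multi (u : List Char) (s : PySem.Set String) (y : String) :
    y ∈ pvA_multi u s ↔ y ∈ s ∨ pvPM u y := by
  rw [pvA_multi, pv_mem_foldl _ (fun q y => PySem.Chars.isIn q.1 u = true ∧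
        pvReplace1 u q.1 q.2 ≠ u ∧ y = String.ofList (pvReplace1 u q.1 q.2))]
  · apply or_congr_right
    unfold pvPM
    constructor
    · rintro ⟨q, hq, _, hne, rfl⟩; exact ⟨q, hq, hne, rfl⟩
    · rintro ⟨q, hq, hne, rfl⟩
      exact ⟨q, hq, by by_contra hno; exact hne (pv_replace1_self_of_not_in u q.1 q.2 (by simpa using hno)), hne, rfl⟩
  · intro s q y
    split_ifs <;> simp_all [PySem.Set.mem_add]

lemma pv_mem_A_double (u : List Char) (s : PySem.Set String) (y : String) :
    y ∈ pvA_double u s ↔ y ∈ s ∨ pvPD u y := by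
  have h4 : ∀ (p : Int × Char) (qi : Char × Char) (s : PySem.Set String) (pj : Int × Char)
      (y : String),
      y ∈ pvOCR_PAIRS.foldl (fun s qj =>
        if pj.2 = qj.1 then
          if pvFix (pvFix u p.1 qi.2) pj.1 qj.2 ≠ u then
            PySem.Set.add s (String.ofList (pvFix (pvFix u p.1 qi.2) pj.1 qj.2))
          else s
        else s) s
      ↔ y ∈ s ∨ ∃ qj ∈ pvOCR_PAIRS, pj.2 = qj.1 ∧ pvFix (pvFix u p.1 qi.2) pj.1 qj.2 ≠ u ∧
          y = String.ofList (pvFix (pvFix u p.1 qi.2) pj.1 qj.2) := by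
    intro p qi s pj y
    rw [pv_mem_foldl _ (fun qj y => pj.2 = qj.1 ∧ pvFix (pvFix u p.1 qi.2) pj.1 qj.2 ≠ u ∧
          y = String.ofList (pvFix (pvFix u p.1 qi.2) pj.1 qj.2))]
    intro s qj y
    split_ifs <;> simp [PySem.Set.mem_add] <;> tauto
  have h3 : ∀ (p : Int × Char) (qi : Char × Char) (s : PySem.Set String) (y : String),
      y ∈ (PySem.List.enumerate (pvFix u p.1 qi.2) 0).foldl (fun s pj =>
        if pj.1 = p.1 then s
        else pvOCR_PAIRS.foldl (fun s qj =>
          if pj.2 = qj.1 then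
            if pvFix (pvFix u p.1 qi.2) pj.1 qj.2 ≠ u then
              PySem.Set.add s (String.ofList (pvFix (pvFix u p.1 qi.2) pj.1 qj.2))
            else s
          else s) s) s
      ↔ y ∈ s ∨ ∃ pj ∈ PySem.List.enumerate (pvFix u p.1 qi.2) 0, pj.1 ≠ p.1 ∧
          ∃ qj ∈ pvOCR_PAIRS, pj.2 = qj.1 ∧ pvFix (pvFix u p.1 qi.2) pj.1 qj.2 ≠ u ∧
            y = String.ofList (pvFix (pvFix u p.1 qi.2) pj.1 qj.2) := by
    intro p qi s y
    rw [pv_mem_foldl _ (fun pj y => pj.1 ≠ p.1 ∧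
          ∃ qj ∈ pvOCR_PAIRS, pj.2 = qj.1 ∧ pvFix (pvFix u p.1 qi.2) pj.1 qj.2 ≠ u ∧
            y = String.ofList (pvFix (pvFix u p.1 qi.2) pj.1 qj.2))]
    intro s pj y
    split_ifs with hc
    · simp [hc]
    · rw [h4 p qi s pj y]; tauto
  have h2 : ∀ (s : PySem.Set String) (p : Int × Char) (y : String),
      y ∈ pvOCR_PAIRS.foldl (fun s qi =>
        if p.2 = qi.1 then
          (PySem.List.enumerate (pvFix u p.1 qi.2) 0).foldl (fun s pj =>
            if pj.1 = p.1 then s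
            else pvOCR_PAIRS.foldl (fun s qj =>
              if pj.2 = qj.1 then
                if pvFix (pvFix u p.1 qi.2) pj.1 qj.2 ≠ u then
                  PySem.Set.add s (String.ofList (pvFix (pvFix u p.1 qi.2) pj.1 qj.2))
                else s
              else s) s) s
        else s) s
      ↔ y ∈ s ∨ ∃ qi ∈ pvOCR_PAIRS, p.2 = qi.1 ∧
          ∃ pj ∈ PySem.List.enumerate (pvFix u p.1 qi.2) 0, pj.1 ≠ p.1 ∧
            ∃ qj ∈ pvOCR_PAIRS, pj.2 = qj.1 ∧ pvFix (pvFix u p.1 qi.2) pj.1 qj.2 ≠ u ∧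
              y = String.ofList (pvFix (pvFix u p.1 qi.2) pj.1 qj.2) := by
    intro s p y
    rw [pv_mem_foldl _ (fun qi y => p.2 = qi.1 ∧
          ∃ pj ∈ PySem.List.enumerate (pvFix u p.1 qi.2) 0, pj.1 ≠ p.1 ∧
            ∃ qj ∈ pvOCR_PAIRS, pj.2 = qj.1 ∧ pvFix (pvFix u p.1 qi.2) pj.1 qj.2 ≠ u ∧
              y = String.ofList (pvFix (pvFix u p.1 qi.2) pj.1 qj.2))]
    intro s qi y
    split_ifs with hc
    · rw [h3 p qi s y]; tauto
    · simp [hc]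
  rw [pvA_double, pv_mem_foldl _ _ h2]
  apply or_congr_right
  constructor
  · rintro ⟨p, hp, qi, hqi, hei, pj, hpj, hne1, qj, hqj, hej, hneu, rfl⟩
    obtain ⟨k, hk, rfl⟩ := (PySem.List.mem_enumerate_iff u 0 p).1 hp
    simp only [zero_add] at hei hpj hne1 hej hneu ⊢
    rw [pvFix_eq_set u k qi.2 hk] at hpj hneu ⊢
    obtain ⟨m, hm, rfl⟩ := (PySem.List.mem_enumerate_iff _ 0 pj).1 hpj
    simp only [zero_add] at hne1 hej hneu ⊢
    have hm' : m < u.length := by simpa using hm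
    have hmk : m ≠ k := fun h => hne1 (by subst h; rfl)
    rw [pvFix_eq_set _ m qj.2 (by simpa using hm')] at hneu ⊢
    refine ⟨k, hk, m, hm', Ne.symm hmk, qi, hqi, qj, hqj, hei, ?_, rfl⟩
    rw [← hej]
    exact Eq.symm (List.getElem_set_ne (by omega) _)
  · rintro ⟨k, hk, m, hm, hkm, qi, hqi, qj, hqj, hek, hem, rfl⟩
    have hmset : m < (u.set k qi.2).length := by simpa using hm
    have hkm' : ((m : Int)) ≠ ((k : Int)) := by exact_mod_cast Ne.symm hkm
    refine ⟨((k : Int), u[k]), (PySem.List.mem_enumerate_iff u 0 _).2 ⟨k, hk, by simp⟩,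
      qi, hqi, hek, ((m : Int), (u.set k qi.2)[m]), ?_, ?_, qj, hqj, ?_, ?_, ?_⟩
    · rw [pvFix_eq_set u k qi.2 hk]
      exact (PySem.List.mem_enumerate_iff _ 0 _).2 ⟨m, hmset, by simp⟩
    · exact hkm'
    · show (u.set k qi.2)[m] = qj.1
      rw [List.getElem_set_ne (by omega)]
      exact hem
    · show pvFix (pvFix u ((k : Int), u[k]).1 qi.2) (m : Int) qj.2 ≠ u
      rw [pvFix_eq_set u k qi.2 hk, pvFix_eq_set _ m qj.2 hmset]
      exact pv_setset_ne u k m qi.2 qj.2 hm hkm (by rw [hem]; exact (pv_pairs_ne qj hqj).symm)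
    · show String.ofList ((u.set k qi.2).set m qj.2) =
        String.ofList (pvFix (pvFix u ((k : Int), u[k]).1 qi.2) (m : Int) qj.2)
      rw [pvFix_eq_set u k qi.2 hk, pvFix_eq_set _ m qj.2 hmset]

-- membership characterisations, port B
lemma pv_mem_edits (u : List Char) (e : Int × Char) :
    e ∈ pvEdits u ↔ ∃ (k : Nat) (_ : k < u.length), ∃ q ∈ pvOCR_PAIRS,
      u[k] = q.1 ∧ e = ((k : Int), q.2) := by
  constructor
  · intro h
    simp only [pvEdits, List.mem_flatMap, List.mem_filterMap] at h
    obtain ⟨p, hp, q, hq, hsome⟩ := h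
    obtain ⟨k, hk, rfl⟩ := (PySem.List.mem_enumerate_iff u 0 p).1 hp
    split_ifs at hsome with hc
    injection hsome with hsome
    exact ⟨k, hk, q, hq, by simpa using hc, by simp [← hsome]⟩
  · rintro ⟨k, hk, q, hq, he, rfl⟩
    simp only [pvEdits, List.mem_flatMap, List.mem_filterMap]
    refine ⟨((k : Int), u[k]), (PySem.List.mem_enumerate_iff u 0 _).2 ⟨k, hk, by simp⟩,
      q, hq, ?_⟩
    simp [he]

lemma pv_mem_B_single (u : List Char) (s : PySem.Set String) (y : String) :
    y ∈ pvB_single u s ↔ y ∈ s ∨ pvPS u y := by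
  rw [pvB_single, pv_mem_foldl _ (fun e y => y = String.ofList (pvFix u e.1 e.2))]
  · apply or_congr_right
    constructor
    · rintro ⟨e, he, rfl⟩
      obtain ⟨k, hk, q, hq, hek, rfl⟩ := (pv_mem_edits u e).1 he
      exact ⟨k, hk, q, hq, hek, by rw [pvFix_eq_set u k q.2 hk]⟩
    · rintro ⟨k, hk, q, hq, hek, rfl⟩
      exact ⟨((k : Int), q.2), (pv_mem_edits u _).2 ⟨k, hk, q, hq, hek, rfl⟩,
        by rw [pvFix_eq_set u k q.2 hk]⟩
  · intro s e y
    simp [PySem.Set.mem_add]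

lemma pv_mem_B_multi (u : List Char) (s : PySem.Set String) (y : String) :
    y ∈ pvB_multi u s ↔ y ∈ s ∨ pvPM u y := by
  rw [pvB_multi, pv_mem_foldl _ (fun q y => pvReplace1 u q.1 q.2 ≠ u ∧
        y = String.ofList (pvReplace1 u q.1 q.2))]
  · rfl
  · intro s q y
    split_ifs <;> simp [PySem.Set.mem_add] <;> tauto

lemma pv_mem_B_double (u : List Char) (s : PySem.Set String) (y : String) :
    y ∈ pvB_double u s ↔ y ∈ s ∨ pvPD u y := by
  have h2 : ∀ (s : PySem.Set String) (e : Int × Char) (y : String),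
      y ∈ (pvEdits u).foldl (fun s f =>
        if e.1 < f.1 then PySem.Set.add s (String.ofList (pvFix2 u e.1 e.2 f.1 f.2)) else s) s
      ↔ y ∈ s ∨ ∃ f ∈ pvEdits u, e.1 < f.1 ∧ y = String.ofList (pvFix2 u e.1 e.2 f.1 f.2) := by
    intro s e y
    rw [pv_mem_foldl _ (fun f y => e.1 < f.1 ∧ y = String.ofList (pvFix2 u e.1 e.2 f.1 f.2))]
    intro s f y
    split_ifs <;> simp [PySem.Set.mem_add] <;> tauto
  rw [pvB_double, pv_mem_foldl _ _ h2]
  apply or_congr_right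
  constructor
  · rintro ⟨e, he, f, hf, hlt, rfl⟩
    obtain ⟨k, hk, qi, hqi, hek, rfl⟩ := (pv_mem_edits u e).1 he
    obtain ⟨m, hm, qj, hqj, hem, rfl⟩ := (pv_mem_edits u f).1 hf
    have hkm : k < m := by simpa using hlt
    exact ⟨k, hk, m, hm, Nat.ne_of_lt hkm, qi, hqi, qj, hqj, hek, hem,
      by rw [pvFix2_eq_set u k m qi.2 qj.2 hkm hm]⟩
  · rintro ⟨k, hk, m, hm, hkm, qi, hqi, qj, hqj, hek, hem, rfl⟩
    rcases Nat.lt_or_ge k m with hlt | hge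
    · exact ⟨((k : Int), qi.2), (pv_mem_edits u _).2 ⟨k, hk, qi, hqi, hek, rfl⟩,
        ((m : Int), qj.2), (pv_mem_edits u _).2 ⟨m, hm, qj, hqj, hem, rfl⟩,
        by simpa using hlt, by rw [pvFix2_eq_set u k m qi.2 qj.2 hlt hm]⟩
    · have hlt : m < k := by omega
      refine ⟨((m : Int), qj.2), (pv_mem_edits u _).2 ⟨m, hm, qj, hqj, hem, rfl⟩,
        ((k : Int), qi.2), (pv_mem_edits u _).2 ⟨k, hk, qi, hqi, hek, rfl⟩,
        by simpa using hlt, ?_⟩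
      rw [pvFix2_eq_set u m k qj.2 qi.2 hlt hk, List.set_comm _ _ hkm]

-- nodup of both candidate sets
lemma pv_nodup_A (u : List Char) :
    (pvA_double u (pvA_multi u (pvA_single u PySem.Set.empty))).Nodup := by
  apply pv_nodup_foldl
  · intro s p hs
    apply pv_nodup_foldl _ _ _ _ hs
    intro s qi hs
    split_ifs
    · apply pv_nodup_foldl _ _ _ _ hs
      intro s pj hs
      split_ifs
      · exact hs
      · apply pv_nodup_foldl _ _ _ _ hs
        intro s qj hs
        split_ifs <;> first | exact PySem.Set.nodup_add _ _ hs | exact hs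
    · exact hs
  · apply pv_nodup_foldl
    · intro s q hs
      split_ifs <;> first | exact PySem.Set.nodup_add _ _ hs | exact hs
    · apply pv_nodup_foldl
      · intro s p hs
        apply pv_nodup_foldl _ _ _ _ hs
        intro s q hs
        split_ifs <;> first | exact PySem.Set.nodup_add _ _ hs | exact hs
      · exact List.nodup_nil

lemma pv_nodup_B (u : List Char) :
    (pvB_double u (pvB_multi u (pvB_single u PySem.Set.empty))).Nodup := by
  apply pv_nodup_foldl
  · intro s e hs
    apply pv_nodup_foldl _ _ _ _ hs
    intro s f hs
    split_ifs <;> first | exact PySem.Set.nodup_add _ _ hs | exact hs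
  · apply pv_nodup_foldl
    · intro s q hs
      split_ifs <;> first | exact PySem.Set.nodup_add _ _ hs | exact hs
    · apply pv_nodup_foldl
      · intro s e hs
        exact PySem.Set.nodup_add _ _ hs
      · exact List.nodup_nil

-- ===== VERDICT (by name: the statement is the Claim_ definition above) =====
theorem generate_corrections_spec : Claim_equal_generate_corrections := by
  intro term _
  unfold Spec_generate_corrections generate_corrections generate_corrections_alt
  apply PySem.List.sorted_eq_sorted_of_perm _ _ _ (fun a b h => h)
  rw [List.perm_ext_iff_of_nodup (pv_nodup_A _) (pv_nodup_B _)]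
  intro y
  rw [pv_mem_A_double, pv_mem_A_multi, pv_mem_A_single,
      pv_mem_B_double, pv_mem_B_multi, pv_mem_B_single]
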